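-- pv_equiv track=rewrite | github.com/ggabriel96/mapnames | mapnames/string.py | diff_view
-- ===== SOURCE A (Python) =====
-- def diff_view(str1, str2):
--     """ Calculate the lengths of the longest common prefix
--     and suffix between str1 and str2.
--
--     Let str1 = axb of length m and str2 = ayb of length n,
--     then this function finds and returns i and j such that:
--     str1[0:i] = str2[0:i] = a and str1[m-j:] = str2[n-j:] = b.
--     In the case that a or b does not exist (no common prefix
--     or suffix), then i or j are 0.
--
--     :param str1: the first string
--     :param str2: the second string
--     :return: common prefix and suffix lengths (i.e. i and j; see description)
--     """
--     m, n = len(str1), len(str2)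
--     len_limit = min(m, n)
--     prefix_len, suffix_len = 0, 0
--     while prefix_len < len_limit and str1[prefix_len] == str2[prefix_len]:
--         prefix_len += 1
--     # was using negative indexing,
--     # I just think this way is better understandable
--     while suffix_len < len_limit \
--             and len_limit - suffix_len > prefix_len \
--             and str1[m - 1 - suffix_len] == str2[n - 1 - suffix_len]:
--         suffix_len += 1
--     return prefix_len, suffix_len
-- ===== SOURCE B (Python) =====
-- def _largest(hi, ok):
--     """Largest k in [0, hi] with ok(k), assuming ok is monotone
--     (true up to some threshold, false after) and ok(0) holds."""
--     lo = 0
--     while lo < hi: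
--         mid = (lo + hi + 1) // 2
--         if ok(mid):
--             lo = mid
--         else:
--             hi = mid - 1
--     return lo
--
-- def diff_view(str1, str2):
--     m, n = len(str1), len(str2)
--     limit = min(m, n)
--     prefix_len = _largest(limit, lambda k: str1[:k] == str2[:k])
--     suffix_len = _largest(limit - prefix_len, lambda k: str1[m - k:] == str2[n - k:])
--     return prefix_len, suffix_len
-- ===== Notes on version B (the rewrite author's own statement) =====
-- stated objective: faster
-- what changed: Replaces A's two linear character-by-character while loops by a generic binary search helper over monotone whole-slice comparisons: the largest k with str1[:k] == str2[:k], then, with the no-overlap cap as the search's upper bound, the largest k with str1[m-k:] == str2[n-k:].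
import Mathlib
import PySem

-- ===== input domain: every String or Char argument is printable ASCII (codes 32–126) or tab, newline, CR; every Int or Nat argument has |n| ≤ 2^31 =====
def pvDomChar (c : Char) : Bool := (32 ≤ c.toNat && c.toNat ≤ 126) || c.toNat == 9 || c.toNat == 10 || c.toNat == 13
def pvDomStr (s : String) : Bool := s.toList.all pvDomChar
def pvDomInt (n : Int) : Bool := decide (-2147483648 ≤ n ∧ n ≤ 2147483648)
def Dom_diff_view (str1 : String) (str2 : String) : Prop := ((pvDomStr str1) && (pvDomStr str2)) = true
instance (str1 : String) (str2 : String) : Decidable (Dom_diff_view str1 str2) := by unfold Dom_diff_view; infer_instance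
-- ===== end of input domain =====

-- B replaces A's two linear character-by-character while loops by binary searches over
-- whole-slice comparisons: the largest k with str1[:k] == str2[:k], then (capped at
-- min(m,n) - prefix) the largest k with str1[m-k:] == str2[n-k:].

-- ===== PORT A =====
-- A's first while loop; str1[prefix_len] is always in range (prefix_len < limit ≤ lengths),
-- so List.getD transcribes the indexing exactly.
def aPrefLoop (s1 s2 : List Char) (limit i : Nat) : Nat :=
  if h : i < limit ∧ s1.getD i ' ' = s2.getD i ' ' then
    aPrefLoop s1 s2 limit (i + 1)
  else i
termination_by limit - i
decreasing_by omega

-- A's second while loop; the indices m-1-j, n-1-j are always in range when the guard holds.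
def aSufLoop (s1 s2 : List Char) (limit pref j : Nat) : Nat :=
  if h : j < limit ∧ limit - j > pref ∧
      s1.getD (s1.length - 1 - j) ' ' = s2.getD (s2.length - 1 - j) ' ' then
    aSufLoop s1 s2 limit pref (j + 1)
  else j
termination_by limit - j
decreasing_by omega

def diff_view (str1 : String) (str2 : String) : Int × Int :=
  let l1 := str1.toList
  let l2 := str2.toList
  let limit := min l1.length l2.length
  let prefixLen := aPrefLoop l1 l2 limit 0
  let suffixLen := aSufLoop l1 l2 limit prefixLen 0
  ((prefixLen : Int), (suffixLen : Int))

-- ===== PORT B =====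
-- Source B's `_largest` while loop: binary search for the largest k in [lo, hi] with ok k,
-- for a monotone ok that holds at lo.
-- structural recursion on a fuel ≥ hi - lo (the loop runs at most hi - lo rounds)
def bsearch (ok : Nat → Bool) (fuel lo hi : Nat) : Nat :=
  match fuel with
  | 0 => lo
  | fuel + 1 =>
    if lo < hi then
      if ok ((lo + hi + 1) / 2) then bsearch ok fuel ((lo + hi + 1) / 2) hi
      else bsearch ok fuel lo ((lo + hi + 1) / 2 - 1)
    else lo

-- slices str1[:k] and str1[m-k:] (0 ≤ k ≤ length) are List.take / List.drop exactly
def diff_view_alt (str1 : String) (str2 : String) : Int × Int :=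
  let l1 := str1.toList
  let l2 := str2.toList
  let m := l1.length
  let n := l2.length
  let limit := min m n
  let prefixLen := bsearch (fun k => l1.take k == l2.take k) limit 0 limit
  let suffixLen := bsearch (fun k => l1.drop (m - k) == l2.drop (n - k)) (limit - prefixLen) 0
    (limit - prefixLen)
  ((prefixLen : Int), (suffixLen : Int))

-- ===== PRECONDITION & SPEC =====
def Spec_diff_view (str1 : String) (str2 : String) (out : Int × Int) : Prop := out = diff_view_alt str1 str2
instance (str1 : String) (str2 : String) (out : Int × Int) : Decidable (Spec_diff_view str1 str2 out) := by unfold Spec_diff_view; infer_instance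

-- ===== CLAIM (what is proved, stated in full; the proofs are below) =====
def Claim_equal_diff_view : Prop := ∀ (str1 : String) (str2 : String), Dom_diff_view str1 str2 → Spec_diff_view str1 str2 (diff_view str1 str2)

-- ===== LEMMAS AND PROOFS =====

-- length of the common prefix of two character lists (the proofs' yardstick for both ports)
def cpLen : List Char → List Char → Nat
  | a :: as, b :: bs => if a = b then cpLen as bs + 1 else 0
  | _, _ => 0

theorem cpLen_le_left : ∀ (l1 l2 : List Char), cpLen l1 l2 ≤ l1.length := by
  intro l1
  induction l1 with
  | nil => intro l2; simp [cpLen]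
  | cons a as ih =>
    intro l2
    cases l2 with
    | nil => simp [cpLen]
    | cons b bs =>
      simp only [cpLen, List.length_cons]
      split
      · exact Nat.add_le_add_right (ih bs) 1
      · omega

theorem cpLen_le_right : ∀ (l1 l2 : List Char), cpLen l1 l2 ≤ l2.length := by
  intro l1
  induction l1 with
  | nil => intro l2; simp [cpLen]
  | cons a as ih =>
    intro l2
    cases l2 with
    | nil => simp [cpLen]
    | cons b bs =>
      simp only [cpLen, List.length_cons]
      split
      · exact Nat.add_le_add_right (ih bs) 1
      · omega

-- a common prefix of length k exists iff k ≤ cpLen (for k within both lengths)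
theorem take_eq_iff_cpLen : ∀ (k : Nat) (l1 l2 : List Char), k ≤ l1.length → k ≤ l2.length →
    (l1.take k = l2.take k ↔ k ≤ cpLen l1 l2) := by
  intro k
  induction k with
  | zero => intro l1 l2 _ _; simp
  | succ k ih =>
    intro l1 l2 h1 h2
    cases l1 with
    | nil => simp at h1
    | cons a as =>
      cases l2 with
      | nil => simp at h2
      | cons b bs =>
        simp only [List.take_succ_cons, cpLen]
        by_cases hab : a = b
        · subst hab
          simp only [if_true, List.cons.injEq, true_and]
          rw [ih as bs (by simpa using h1) (by simpa using h2)]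
          omega
        · simp only [if_neg hab]
          constructor
          · intro h; exact absurd (List.head_eq_of_cons_eq h) hab
          · omega

-- the binary search finds the threshold of a monotone predicate
theorem bsearch_eq (ok : Nat → Bool) (t : Nat) :
    ∀ (fuel lo hi : Nat), hi - lo ≤ fuel → lo ≤ hi →
      (∀ k, lo < k → k ≤ hi → (ok k = true ↔ k ≤ t)) →
      bsearch ok fuel lo hi = max lo (min hi t) := by
  intro fuel
  induction fuel with
  | zero =>
    intro lo hi hd hle _
    have : lo = hi := by omega
    subst this
    simp only [bsearch]
    omega
  | succ d ih =>
    intro lo hi hd hle hok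
    by_cases hlt : lo < hi
    · have hmid1 : lo < (lo + hi + 1) / 2 := by omega
      have hmid2 : (lo + hi + 1) / 2 ≤ hi := by omega
      rw [bsearch, if_pos hlt]
      by_cases hc : ok ((lo + hi + 1) / 2) = true
      · have htle : (lo + hi + 1) / 2 ≤ t := (hok _ hmid1 hmid2).mp hc
        rw [if_pos hc, ih _ hi (by omega) (by omega)
          (fun k hk1 hk2 => hok k (by omega) hk2)]
        omega
      · have htlt : t < (lo + hi + 1) / 2 := by
          by_contra h
          exact hc ((hok _ hmid1 hmid2).mpr (by omega))
        rw [if_neg hc, ih lo _ (by omega) (by omega)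
          (fun k hk1 hk2 => hok k hk1 (by omega))]
        omega
    · have : lo = hi := by omega
      subst this
      rw [bsearch, if_neg (by omega)]
      omega

theorem aPrefLoop_eq (s1 s2 : List Char) (limit : Nat)
    (h1 : limit ≤ s1.length) (h2 : limit ≤ s2.length) :
    ∀ k i, limit - i = k → i ≤ limit →
      aPrefLoop s1 s2 limit i = min limit (i + cpLen (s1.drop i) (s2.drop i)) := by
  intro k
  induction k with
  | zero =>
    intro i hk hi
    have : i = limit := by omega
    subst this
    rw [aPrefLoop]
    simp only [lt_irrefl, false_and, dite_false]
    omega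
  | succ k ih =>
    intro i hk hi
    have hilt : i < limit := by omega
    have hi1 : i < s1.length := by omega
    have hi2 : i < s2.length := by omega
    have d1 : s1.drop i = s1[i] :: s1.drop (i + 1) := (List.getElem_cons_drop hi1).symm
    have d2 : s2.drop i = s2[i] :: s2.drop (i + 1) := (List.getElem_cons_drop hi2).symm
    have g1 : s1.getD i ' ' = s1[i] := List.getD_eq_getElem s1 ' ' hi1
    have g2 : s2.getD i ' ' = s2[i] := List.getD_eq_getElem s2 ' ' hi2
    rw [aPrefLoop]
    by_cases hc : s1[i] = s2[i]
    · rw [dif_pos ⟨hilt, by rw [g1, g2, hc]⟩]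
      rw [ih (i + 1) (by omega) (by omega)]
      rw [d1, d2]
      simp only [cpLen, if_pos hc]
      omega
    · rw [dif_neg (by rw [g1, g2]; exact fun h => hc h.2)]
      rw [d1, d2]
      simp only [cpLen, if_neg hc]
      omega

theorem aSufLoop_eq (s1 s2 : List Char) (limit pref : Nat)
    (h1 : limit ≤ s1.length) (h2 : limit ≤ s2.length) (hp : pref ≤ limit) :
    ∀ k j, limit - pref - j = k → j ≤ limit - pref →
      aSufLoop s1 s2 limit pref j
        = min (limit - pref) (j + cpLen (s1.reverse.drop j) (s2.reverse.drop j)) := by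
  intro k
  induction k with
  | zero =>
    intro j hk hj
    have hje : j = limit - pref := by omega
    rw [aSufLoop]
    rw [dif_neg (by omega)]
    omega
  | succ k ih =>
    intro j hk hj
    have hjlt : j < limit - pref := by omega
    have hj1 : j < s1.reverse.length := by simp; omega
    have hj2 : j < s2.reverse.length := by simp; omega
    have d1 : s1.reverse.drop j = s1.reverse[j] :: s1.reverse.drop (j + 1) :=
      (List.getElem_cons_drop hj1).symm
    have d2 : s2.reverse.drop j = s2.reverse[j] :: s2.reverse.drop (j + 1) :=
      (List.getElem_cons_drop hj2).symm
    have g1 : s1.getD (s1.length - 1 - j) ' ' = s1.reverse[j] := by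
      rw [List.getElem_reverse]
      exact List.getD_eq_getElem s1 ' ' (by omega)
    have g2 : s2.getD (s2.length - 1 - j) ' ' = s2.reverse[j] := by
      rw [List.getElem_reverse]
      exact List.getD_eq_getElem s2 ' ' (by omega)
    rw [aSufLoop]
    by_cases hc : s1.reverse[j] = s2.reverse[j]
    · rw [dif_pos ⟨by omega, by omega, by rw [g1, g2, hc]⟩]
      rw [ih (j + 1) (by omega) (by omega)]
      rw [d1, d2]
      simp only [cpLen, if_pos hc]
      omega
    · rw [dif_neg (by rw [g1, g2]; exact fun h => hc h.2.2)]
      rw [d1, d2]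
      simp only [cpLen, if_neg hc]
      omega

-- ===== VERDICT (by name: the statement is the Claim_ definition above) =====
theorem diff_view_spec : Claim_equal_diff_view := by
  intro str1 str2 _
  unfold Spec_diff_view diff_view diff_view_alt
  dsimp only
  set l1 := str1.toList
  set l2 := str2.toList
  set limit := min l1.length l2.length with hlimit
  have h1 : limit ≤ l1.length := Nat.min_le_left _ _
  have h2 : limit ≤ l2.length := Nat.min_le_right _ _
  have hcp : cpLen l1 l2 ≤ limit := le_min (cpLen_le_left l1 l2) (cpLen_le_right l1 l2)
  have hraw : cpLen l1.reverse l2.reverse ≤ limit := by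
    have := cpLen_le_left l1.reverse l2.reverse
    have := cpLen_le_right l1.reverse l2.reverse
    simp at *; omega
  -- A's two loops
  have hpref : aPrefLoop l1 l2 limit 0 = cpLen l1 l2 := by
    rw [aPrefLoop_eq l1 l2 limit h1 h2 (limit - 0) 0 rfl (Nat.zero_le _)]
    simp only [List.drop_zero, Nat.zero_add]
    omega
  have hsuf : aSufLoop l1 l2 limit (cpLen l1 l2) 0
      = min (limit - cpLen l1 l2) (cpLen l1.reverse l2.reverse) := by
    rw [aSufLoop_eq l1 l2 limit (cpLen l1 l2) h1 h2 hcp (limit - cpLen l1 l2 - 0) 0 rfl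
      (Nat.zero_le _)]
    simp only [List.drop_zero, Nat.zero_add]
  -- B's two binary searches
  have hb1 : bsearch (fun k => l1.take k == l2.take k) limit 0 limit = cpLen l1 l2 := by
    rw [bsearch_eq _ (cpLen l1 l2) limit 0 limit (by omega) (Nat.zero_le _)]
    · omega
    · intro k _ hk
      simp only [beq_iff_eq]
      exact take_eq_iff_cpLen k l1 l2 (by omega) (by omega)
  have hb2 : bsearch (fun k => l1.drop (l1.length - k) == l2.drop (l2.length - k))
      (limit - cpLen l1 l2) 0 (limit - cpLen l1 l2)
      = min (limit - cpLen l1 l2) (cpLen l1.reverse l2.reverse) := by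
    rw [bsearch_eq _ (cpLen l1.reverse l2.reverse) _ 0 _ (by omega) (Nat.zero_le _)]
    · omega
    · intro k _ hk
      simp only [beq_iff_eq]
      have e1 : l1.drop (l1.length - k) = (l1.reverse.take k).reverse := by
        rw [List.take_reverse, List.reverse_reverse]
      have e2 : l2.drop (l2.length - k) = (l2.reverse.take k).reverse := by
        rw [List.take_reverse, List.reverse_reverse]
      rw [e1, e2]
      constructor
      · intro h
        exact (take_eq_iff_cpLen k l1.reverse l2.reverse (by simp; omega) (by simp; omega)).mp
          (List.reverse_injective h)
      · intro h
        rw [(take_eq_iff_cpLen k l1.reverse l2.reverse (by simp; omega) (by simp; omega)).mpr h]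
  rw [hpref, hsuf, hb1, hb2]
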